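-- pv_equiv track=rewrite | github.com/JinnZ2/Resilience | octahedral-nfs/src/factor_base.py | octahedral_mapping
-- ===== SOURCE A (Python) =====
-- def octahedral_mapping(primes):
--     """
--     Map primes to octahedral coordinates.
--
--     Returns:
--         prime_to_octa: dict {prime: octahedron_index}
--         prime_to_vertex: dict {prime: vertex_index (0,1,2)}
--         octa_to_primes: list of lists [[p0,p1,p2], ...]
--     """
--     prime_to_octa = {}
--     prime_to_vertex = {}
--     octa_to_primes = []
--
--     for i, p in enumerate(primes):
--         octa_idx = i // 3
--         vertex_idx = i % 3
--         prime_to_octa[p] = octa_idx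
--         prime_to_vertex[p] = vertex_idx
--
--         if vertex_idx == 0:
--             octa_to_primes.append([p, None, None])
--         else:
--             octa_to_primes[octa_idx][vertex_idx] = p
--
--     return prime_to_octa, prime_to_vertex, octa_to_primes
-- ===== SOURCE B (Python) =====
-- def octahedral_mapping(primes):
--     """
--     Map primes to octahedral coordinates.
--
--     Chunked build: each octahedron row is constructed whole from a slice of
--     three primes (padded with None), instead of appending a fresh row and
--     patching it element by element.
--     """
--     plist = list(primes)
--     prime_to_octa = {}
--     prime_to_vertex = {}
--     octa_to_primes = []
--     for octa_idx, start in enumerate(range(0, len(plist), 3)):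
--         group = plist[start:start + 3]
--         octa_to_primes.append((group + [None, None, None])[:3])
--         for vertex_idx, p in enumerate(group):
--             prime_to_octa[p] = octa_idx
--             prime_to_vertex[p] = vertex_idx
--     return prime_to_octa, prime_to_vertex, octa_to_primes
-- ===== Notes on version B (the rewrite author's own statement) =====
-- stated objective: alternative
-- what changed: B iterates over chunk starts (range step 3) and builds each octahedron row whole from a padded slice, with an inner enumerate filling both dicts per chunk, instead of A's per-element loop that appends a fresh row on vertex 0 and patches the existing row otherwise.
import Mathlib
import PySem

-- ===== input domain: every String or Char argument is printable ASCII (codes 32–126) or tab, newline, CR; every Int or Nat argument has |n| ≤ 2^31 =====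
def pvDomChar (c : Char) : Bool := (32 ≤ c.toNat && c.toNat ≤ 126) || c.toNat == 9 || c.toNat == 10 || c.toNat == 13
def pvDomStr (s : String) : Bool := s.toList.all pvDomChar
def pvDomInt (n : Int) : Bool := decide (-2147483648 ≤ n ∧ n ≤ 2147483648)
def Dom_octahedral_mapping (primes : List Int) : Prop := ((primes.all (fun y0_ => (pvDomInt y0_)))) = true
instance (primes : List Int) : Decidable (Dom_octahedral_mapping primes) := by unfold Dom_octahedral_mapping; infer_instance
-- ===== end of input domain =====

-- B builds each octahedron row whole from a padded 3-slice (chunk loop) instead of A's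
-- per-element append-or-patch loop; same O(n) cost, alternative decomposition.

-- ===== PORT A =====
-- loop body of A: i//3, i%3, dict writes, then append a fresh row or patch the existing one
def octaStepA (st : PySem.Dict Int Int × PySem.Dict Int Int × List (List (Option Int)))
    (ip : Int × Int) : PySem.Dict Int Int × PySem.Dict Int Int × List (List (Option Int)) :=
  let i := ip.1
  let p := ip.2
  let octa_idx := PySem.Int.floordiv i 3
  let vertex_idx := PySem.Int.mod i 3
  let d1 := st.1.insert p octa_idx
  let d2 := st.2.1.insert p vertex_idx
  let rows :=
    if vertex_idx == 0 then
      st.2.2 ++ [[some p, none, none]]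
    else
      -- octa_to_primes[octa_idx][vertex_idx] = p ; both indices are always in range here
      PySem.List.pySetD st.2.2 octa_idx
        (PySem.List.pySetD (PySem.List.pyGetD st.2.2 octa_idx []) vertex_idx (some p))
  (d1, d2, rows)

def octahedral_mapping (primes : List Int) :
    (List (Int × Int)) × (List (Int × Int)) × List (List (Option Int)) :=
  let r := (PySem.List.enumerate primes 0).foldl octaStepA (PySem.Dict.empty, PySem.Dict.empty, [])
  (r.1.items, r.2.1.items, r.2.2)

-- ===== PORT B =====
-- chunk body of B: group = plist[start:start+3]; append (group+[None]*3)[:3]; inner enumerate fills the dicts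
def octaChunkB (plist : List Int)
    (st : PySem.Dict Int Int × PySem.Dict Int Int × List (List (Option Int)))
    (os : Int × Int) : PySem.Dict Int Int × PySem.Dict Int Int × List (List (Option Int)) :=
  let octa_idx := os.1
  let start := os.2
  let group := PySem.List.slice plist (some start) (some (start + 3))
  let rows := st.2.2 ++ [PySem.List.slice (group.map some ++ [none, none, none]) none (some 3)]
  let ds := (PySem.List.enumerate group 0).foldl
      (fun (ds : PySem.Dict Int Int × PySem.Dict Int Int) vp =>
        (ds.1.insert vp.2 octa_idx, ds.2.insert vp.2 vp.1)) (st.1, st.2.1)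
  (ds.1, ds.2, rows)

def octahedral_mapping_alt (primes : List Int) :
    (List (Int × Int)) × (List (Int × Int)) × List (List (Option Int)) :=
  let plist := primes
  let r := (PySem.List.enumerate (PySem.List.pyRange 0 (PySem.List.len plist) 3) 0).foldl
      (octaChunkB plist) (PySem.Dict.empty, PySem.Dict.empty, [])
  (r.1.items, r.2.1.items, r.2.2)

-- ===== PRECONDITION & SPEC =====
def Spec_octahedral_mapping (primes : List Int) (out : (List (Int × Int)) × (List (Int × Int)) × List (List (Option Int))) : Prop := out = octahedral_mapping_alt primes
instance (primes : List Int) (out : (List (Int × Int)) × (List (Int × Int)) × List (List (Option Int))) : Decidable (Spec_octahedral_mapping primes out) := by unfold Spec_octahedral_mapping; infer_instance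

-- ===== CLAIM (what is proved, stated in full; the proofs are below) =====
def Claim_equal_octahedral_mapping : Prop := ∀ (primes : List Int), Dom_octahedral_mapping primes → Spec_octahedral_mapping primes (octahedral_mapping primes)

-- ===== LEMMAS AND PROOFS =====

lemma pyRange3_nil (a b : Int) (h : b ≤ a) : PySem.List.pyRange a b 3 = [] := by
  rw [PySem.List.pyRange_of_pos _ _ (by norm_num)]
  rw [if_neg (by omega)]
  simp

lemma pyRange3_cons (a b : Int) (h : a < b) : PySem.List.pyRange a b 3 = a :: PySem.List.pyRange (a + 3) b 3 := by
  rw [PySem.List.pyRange_of_pos _ _ (by norm_num), PySem.List.pyRange_of_pos _ _ (by norm_num)]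
  rw [if_pos h]
  have hc : ((b - a + 3 - 1) / 3).toNat
      = (if a + 3 < b then ((b - (a + 3) + 3 - 1) / 3).toNat else 0) + 1 := by
    split_ifs with h2 <;> omega
  rw [hc, List.range_succ_eq_map]
  simp only [List.map_cons, List.map_map]
  rw [List.cons.injEq]
  refine ⟨by ring, List.map_congr_left ?_⟩
  intro x _
  simp only [Function.comp_apply, Nat.succ_eq_add_one]
  push_cast
  ring

lemma fd0 (k : Int) : PySem.Int.floordiv (3 * k) 3 = k := by
  rw [PySem.Int.floordiv_eq_ediv_of_pos (by norm_num)]; omega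
lemma fd1 (k : Int) : PySem.Int.floordiv (3 * k + 1) 3 = k := by
  rw [PySem.Int.floordiv_eq_ediv_of_pos (by norm_num)]; omega
lemma fd2 (k : Int) : PySem.Int.floordiv (3 * k + 2) 3 = k := by
  rw [PySem.Int.floordiv_eq_ediv_of_pos (by norm_num)]; omega
lemma md0 (k : Int) : PySem.Int.mod (3 * k) 3 = 0 := by
  rw [PySem.Int.mod_eq_emod_of_pos (by norm_num)]; omega
lemma md1 (k : Int) : PySem.Int.mod (3 * k + 1) 3 = 1 := by
  rw [PySem.Int.mod_eq_emod_of_pos (by norm_num)]; omega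
lemma md2 (k : Int) : PySem.Int.mod (3 * k + 2) 3 = 2 := by
  rw [PySem.Int.mod_eq_emod_of_pos (by norm_num)]; omega

lemma loop_eq_nil (plist : List Int) (k : Nat)
    (st : PySem.Dict Int Int × PySem.Dict Int Int × List (List (Option Int)))
    (hrest : ([] : List Int) = plist.drop (3 * k)) :
    (PySem.List.enumerate ([] : List Int) (3 * (k : Int))).foldl octaStepA st
      = (PySem.List.enumerate (PySem.List.pyRange (3 * (k : Int)) (plist.length : Int) 3) (k : Int)).foldl
          (octaChunkB plist) st := by
  have hlen : plist.length ≤ 3 * k := by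
    have := congrArg List.length hrest
    simp [List.length_drop] at this
    omega
  rw [pyRange3_nil _ _ (by exact_mod_cast hlen)]
  simp [PySem.List.enumerate_nil]

lemma take3_slice {α : Type} (xs : List α) :
    PySem.List.slice xs none (some (3 : Int)) = xs.take 3 := by
  rw [PySem.List.slice_to xs (by norm_num)]
  rfl

-- main invariant: A's fold over the remaining suffix equals B's fold over the remaining chunk starts
lemma loop_eq (plist : List Int) : ∀ (n : Nat), ∀ (rest : List Int), rest.length ≤ n →
    ∀ (k : Nat) (st : PySem.Dict Int Int × PySem.Dict Int Int × List (List (Option Int))),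
    st.2.2.length = k → rest = plist.drop (3 * k) →
    (PySem.List.enumerate rest (3 * (k : Int))).foldl octaStepA st
      = (PySem.List.enumerate (PySem.List.pyRange (3 * (k : Int)) (plist.length : Int) 3) (k : Int)).foldl
          (octaChunkB plist) st := by
  intro n
  induction n with
  | zero =>
    intro rest hle k st hlen hrest
    have h0 : rest = [] := List.eq_nil_of_length_eq_zero (by omega)
    subst h0
    exact loop_eq_nil plist k st hrest
  | succ n ih =>
    intro rest hle k st hlen hrest
    obtain ⟨d1, d2, rows⟩ := st
    simp only at hlen
    subst hlen
    cases rest with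
    | nil => exact loop_eq_nil plist rows.length (d1, d2, rows) hrest
    | cons p rest' =>
      have hlt : 3 * rows.length < plist.length := by
        have := congrArg List.length hrest
        simp [List.length_drop] at this
        omega
      have hlt' : 3 * (rows.length : Int) < (plist.length : Int) := by exact_mod_cast hlt
      rw [pyRange3_cons _ _ hlt']
      rw [PySem.List.enumerate_cons]
      have hgroup : PySem.List.slice plist (some (3 * (rows.length : Int)))
          (some (3 * (rows.length : Int) + 3)) = (p :: rest').take 3 := by
        rw [show (3 * ((rows.length : Nat) : Int)) = ((3 * rows.length : Nat) : Int) by push_cast; ring]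
        rw [show (((3 * rows.length : Nat) : Int) + 3) = ((3 * rows.length : Nat) : Int) + ((3 : Nat) : Int) by norm_num]
        rw [PySem.List.slice_natCast_add, hrest]
      cases rest' with
      | nil =>
        -- chunk of one element
        have hend : plist.length ≤ 3 * (rows.length + 1) := by
          have := congrArg List.length hrest
          simp [List.length_drop] at this
          omega
        simp only [List.foldl_cons]
        rw [show (3 * (rows.length : Int) + 3) = 3 * ((rows.length + 1 : Nat) : Int) by push_cast; ring,
          pyRange3_nil _ _ (by exact_mod_cast hend)]
        simp only [PySem.List.enumerate_nil, PySem.List.enumerate_cons, List.foldl_cons,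
          List.foldl_nil]
        simp only [octaStepA, octaChunkB, hgroup]
        rw [fd0, md0]
        simp [PySem.List.enumerate_cons, take3_slice]
      | cons q rest'' =>
        cases rest'' with
        | nil =>
          -- chunk of two elements
          have hend : plist.length ≤ 3 * (rows.length + 1) := by
            have := congrArg List.length hrest
            simp [List.length_drop] at this
            omega
          simp only [List.foldl_cons]
          rw [show (3 * (rows.length : Int) + 3) = 3 * ((rows.length + 1 : Nat) : Int) by push_cast; ring,
            pyRange3_nil _ _ (by exact_mod_cast hend)]
          simp only [PySem.List.enumerate_nil, PySem.List.enumerate_cons, List.foldl_cons,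
            List.foldl_nil]
          simp only [octaStepA, octaChunkB, hgroup]
          rw [fd0, md0, show (3 * (rows.length : Int) + 1) = 3 * (rows.length : Int) + 1 from rfl]
          rw [fd1, md1]
          simp [PySem.List.enumerate_cons, take3_slice, PySem.List.pySetD_of_nonneg]
        | cons r rest₃ =>
          -- full chunk of three elements, recurse
          have harith : (3 * (rows.length : Int) + 1 + 1 + 1) = 3 * ((rows.length + 1 : Nat) : Int) := by
            push_cast; ring
          have hrest₃ : rest₃ = plist.drop (3 * (rows.length + 1)) := by
            have : (p :: q :: r :: rest₃).drop 3 = (plist.drop (3 * rows.length)).drop 3 := by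
              rw [hrest]
            simpa [List.drop_drop, Nat.add_comm, show 3 + 3 * rows.length = 3 * (rows.length + 1) by ring] using this
          have hih := ih rest₃ (by simp at hle; omega) (rows.length + 1)
            (d1.insert p (rows.length : Int) |>.insert q (rows.length : Int) |>.insert r (rows.length : Int),
             d2.insert p 0 |>.insert q 1 |>.insert r 2,
             rows ++ [[some p, some q, some r]])
            (by simp) hrest₃
          simp only [PySem.List.enumerate_cons, List.foldl_cons]
          simp only [octaStepA]
          rw [show (3 * (rows.length : Int) + 1 + 1 + 1) = 3 * ((rows.length + 1 : Nat) : Int) by push_cast; ring]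
          rw [show (3 * (rows.length : Int) + 1 + 1) = 3 * (rows.length : Int) + 2 by ring]
          simp only [fd0, md0, fd1, md1, fd2, md2]
          simp only [octaChunkB, hgroup]
          simp [take3_slice, PySem.List.pySetD_of_nonneg, PySem.List.enumerate_cons] at hih ⊢
          rw [show ((rows.length : Int) + 1) = ((rows.length + 1 : Nat) : Int) by push_cast; ring,
            show (3 * (rows.length : Int) + 3) = 3 * ((rows.length + 1 : Nat) : Int) by push_cast; ring]
          exact hih

-- ===== VERDICT (by name: the statement is the Claim_ definition above) =====
theorem octahedral_mapping_spec : Claim_equal_octahedral_mapping := by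
  intro primes _
  unfold Spec_octahedral_mapping octahedral_mapping octahedral_mapping_alt
  have h := loop_eq primes primes.length primes le_rfl 0
      (PySem.Dict.empty, PySem.Dict.empty, []) rfl (by simp)
  simp only [Nat.cast_zero, mul_zero] at h
  simp [h]
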